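-- pv_equiv track=rewrite | github.com/transducens/smart-segmentation | parsing.py | segmentations_to_coarse_atoms
-- ===== SOURCE A (Python) =====
-- def segmentations_to_coarse_atoms(w,segmentations):
--     breaks=set()
--     #A segmentation for training morfessor compatible with
--     #all the segmentations compatible with the suffixes
--     # is the one that contains the union of all the break points
--     for segmentation in segmentations:
--         p=0
--         for s in segmentation:
--             p+=len(s)
--             breaks.add(p)
--     result=[]
--     prevPosition=0
--     for i in range(len(w)+1):
--         if i in breaks:
--             result.append(w[prevPosition:i])
--             prevPosition=i
--     return result
-- ===== SOURCE B (Python) =====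
-- def segmentations_to_coarse_atoms(w, segmentations):
--     breaks = set()
--     for segmentation in segmentations:
--         p = 0
--         for s in segmentation:
--             p += len(s)
--             breaks.add(p)
--     bs = sorted(b for b in breaks if b <= len(w))
--     return [w[a:b] for a, b in zip([0] + bs, bs)]
-- ===== Notes on version B (the rewrite author's own statement) =====
-- stated objective: idiomatic
-- what changed: The second phase no longer scans every position 0..len(w) testing set membership; it sorts the in-range break points and builds the segments directly from consecutive boundary pairs with zip.
import Mathlib
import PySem

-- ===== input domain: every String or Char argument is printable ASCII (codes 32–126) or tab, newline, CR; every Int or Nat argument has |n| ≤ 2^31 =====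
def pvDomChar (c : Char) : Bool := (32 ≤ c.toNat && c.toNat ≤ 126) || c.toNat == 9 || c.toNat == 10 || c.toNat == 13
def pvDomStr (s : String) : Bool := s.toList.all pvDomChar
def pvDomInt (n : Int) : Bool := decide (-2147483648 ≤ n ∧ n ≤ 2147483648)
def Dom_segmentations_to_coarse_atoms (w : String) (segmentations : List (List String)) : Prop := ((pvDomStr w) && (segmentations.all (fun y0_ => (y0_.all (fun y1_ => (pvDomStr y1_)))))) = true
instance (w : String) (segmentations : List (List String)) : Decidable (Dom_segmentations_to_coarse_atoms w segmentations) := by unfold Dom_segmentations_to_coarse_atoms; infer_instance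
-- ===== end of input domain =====

-- B replaces A's scan over every word position (membership-testing each index) by sorting the
-- in-range break points and slicing between consecutive boundaries (idiomatic; same cost class).


-- ===== PORT A =====
-- both Pythons build `breaks` by the identical first loop; shared helper
def pvBreaks (segmentations : List (List String)) : PySem.Set Int :=
  segmentations.foldl (fun breaks segmentation =>
    (segmentation.foldl (fun (st : Int × PySem.Set Int) s =>
        (st.1 + PySem.Str.len s, PySem.Set.add st.2 (st.1 + PySem.Str.len s)))
      (0, breaks)).2) PySem.Set.empty

def segmentations_to_coarse_atoms (w : String) (segmentations : List (List String)) : List String :=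
  ((PySem.List.pyRange 0 (PySem.Str.len w + 1) 1).foldl
    (fun (st : List String × Int) i =>
      if PySem.Set.contains (pvBreaks segmentations) i then
        (st.1 ++ [PySem.Str.slice w (some st.2) (some i)], i)
      else st) ([], 0)).1

-- ===== PORT B =====
def segmentations_to_coarse_atoms_alt (w : String) (segmentations : List (List String)) : List String :=
  let bs := PySem.List.sorted
    ((pvBreaks segmentations).filter (fun b => decide (b ≤ PySem.Str.len w))) (fun x => x) false
  (List.zip (0 :: bs) bs).map (fun ab => PySem.Str.slice w (some ab.1) (some ab.2))

-- ===== PRECONDITION & SPEC =====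
def Spec_segmentations_to_coarse_atoms (w : String) (segmentations : List (List String)) (out : List String) : Prop := out = segmentations_to_coarse_atoms_alt w segmentations
instance (w : String) (segmentations : List (List String)) (out : List String) : Decidable (Spec_segmentations_to_coarse_atoms w segmentations out) := by unfold Spec_segmentations_to_coarse_atoms; infer_instance

-- ===== CLAIM (what is proved, stated in full; the proofs are below) =====
def Claim_equal_segmentations_to_coarse_atoms : Prop := ∀ (w : String) (segmentations : List (List String)), Dom_segmentations_to_coarse_atoms w segmentations → Spec_segmentations_to_coarse_atoms w segmentations (segmentations_to_coarse_atoms w segmentations)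

-- ===== LEMMAS AND PROOFS =====

-- the segments cut between consecutive boundaries, starting at `prev`
-- the last boundary seen so far (value of prevPosition)
def pvLast (prev : Int) : List Int → Int
  | [] => prev
  | b :: bs => pvLast b bs

def pvChunks (w : String) (prev : Int) : List Int → List String
  | [] => []
  | b :: bs => PySem.Str.slice w (some prev) (some b) :: pvChunks w b bs

theorem pvChunks_eq_zip_map (w : String) (prev : Int) (bs : List Int) :
    (List.zip (prev :: bs) bs).map (fun ab => PySem.Str.slice w (some ab.1) (some ab.2))
      = pvChunks w prev bs := by
  induction bs generalizing prev with
  | nil => rfl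
  | cons b bs ih => simp [pvChunks, List.zip, ← ih b]

theorem pvLen_nonneg (s : String) : 0 ≤ PySem.Str.len s := by
  simp [PySem.Str.len_eq]

-- A's scanning loop, characterised by the filtered index list
theorem pvFoldA (w : String) (c : Int → Bool) (L : List Int)
    (res : List String) (prev : Int) :
    L.foldl (fun (st : List String × Int) i =>
      if c i then
        (st.1 ++ [PySem.Str.slice w (some st.2) (some i)], i)
      else st) (res, prev)
    = (res ++ pvChunks w prev (L.filter c), pvLast prev (L.filter c)) := by
  induction L generalizing res prev with
  | nil => simp [pvChunks, pvLast]
  | cons i L ih =>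
    simp only [List.foldl_cons, List.filter_cons]
    cases h : c i with
    | true => simp [ih, pvChunks, pvLast]
    | false => simp [ih]

theorem pvBreaks_nodup_nonneg (segmentations : List (List String)) :
    (pvBreaks segmentations).Nodup ∧ ∀ x ∈ pvBreaks segmentations, 0 ≤ x := by
  unfold pvBreaks
  suffices h : ∀ (segs : List (List String)) (init : PySem.Set Int),
      init.Nodup → (∀ x ∈ init, 0 ≤ x) →
      (segs.foldl (fun breaks segmentation =>
        (segmentation.foldl (fun (st : Int × PySem.Set Int) s =>
            (st.1 + PySem.Str.len s, PySem.Set.add st.2 (st.1 + PySem.Str.len s)))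
          (0, breaks)).2) init).Nodup ∧
      ∀ x ∈ segs.foldl (fun breaks segmentation =>
        (segmentation.foldl (fun (st : Int × PySem.Set Int) s =>
            (st.1 + PySem.Str.len s, PySem.Set.add st.2 (st.1 + PySem.Str.len s)))
          (0, breaks)).2) init, 0 ≤ x by
    exact h segmentations PySem.Set.empty (by simp [PySem.Set.empty]) (by simp [PySem.Set.empty])
  intro segs
  induction segs with
  | nil => intro init h1 h2; exact ⟨h1, h2⟩
  | cons seg segs ih =>
    intro init h1 h2
    simp only [List.foldl_cons]
    apply ih
    · -- inner fold keeps Nodup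
      suffices hin : ∀ (l : List String) (p : Int) (s : PySem.Set Int), s.Nodup →
          ((l.foldl (fun (st : Int × PySem.Set Int) s =>
            (st.1 + PySem.Str.len s, PySem.Set.add st.2 (st.1 + PySem.Str.len s))) (p, s)).2).Nodup by
        exact hin seg 0 init h1
      intro l
      induction l with
      | nil => intro p s hs; exact hs
      | cons a l ihl => intro p s hs; exact ihl _ _ (PySem.Set.nodup_add _ _ hs)
    · -- inner fold keeps nonnegativity, given p ≥ 0
      suffices hin : ∀ (l : List String) (p : Int) (s : PySem.Set Int), 0 ≤ p → (∀ x ∈ s, 0 ≤ x) →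
          ∀ x ∈ (l.foldl (fun (st : Int × PySem.Set Int) s =>
            (st.1 + PySem.Str.len s, PySem.Set.add st.2 (st.1 + PySem.Str.len s))) (p, s)).2, 0 ≤ x by
        exact hin seg 0 init le_rfl h2
      intro l
      induction l with
      | nil => intro p s _ hs; exact hs
      | cons a l ihl =>
        intro p s hp hs
        refine ihl (p + PySem.Str.len a) _ ?_ ?_
        · have := pvLen_nonneg a
          omega
        · intro x hx
          rcases (PySem.Set.mem_add _ _ _).1 hx with h | h
          · exact hs x h
          · have := pvLen_nonneg a
            omega

theorem pvSorted_filter (breaks : PySem.Set Int) (hnd : breaks.Nodup)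
    (hnn : ∀ x ∈ breaks, 0 ≤ x) (n : Int) :
    PySem.List.sorted (breaks.filter (fun b => decide (b ≤ n))) (fun x => x) false
      = (PySem.List.pyRange 0 (n + 1) 1).filter (fun i => PySem.Set.contains breaks i) := by
  apply PySem.List.sorted_eq_of_perm_of_pairwise_lt
  · rw [List.perm_ext_iff_of_nodup
      (List.Nodup.filter _ (PySem.List.nodup_pyRange_one 0 (n+1)))
      (List.Nodup.filter _ hnd)]
    intro a
    simp only [List.mem_filter, PySem.List.mem_pyRange_one, PySem.Set.contains_eq_listContains,
      List.contains_iff_mem, decide_eq_true_eq]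
    constructor
    · rintro ⟨⟨h0, h1⟩, h2⟩; exact ⟨h2, by omega⟩
    · rintro ⟨h1, h2⟩; exact ⟨⟨hnn a h1, by omega⟩, h1⟩
  · exact List.Pairwise.filter _ (PySem.List.pairwise_lt_pyRange_one 0 (n+1))

-- ===== VERDICT (by name: the statement is the Claim_ definition above) =====
theorem segmentations_to_coarse_atoms_spec : Claim_equal_segmentations_to_coarse_atoms := by
  intro w segmentations _
  unfold Spec_segmentations_to_coarse_atoms segmentations_to_coarse_atoms
    segmentations_to_coarse_atoms_alt
  obtain ⟨hnd, hnn⟩ := pvBreaks_nodup_nonneg segmentations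
  rw [pvFoldA, pvChunks_eq_zip_map,
    pvSorted_filter (pvBreaks segmentations) hnd hnn (PySem.Str.len w)]
  rfl
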